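-- pv_equiv track=rewrite | github.com/pypi-data/pypi-mirror-90 | packages/dada-video/dada-video-0.0.9.tar.gz/dada-video-0.0.9/dada_video/ffmpeg_utils.py | _split_ffprobe_video_and_audio_streams
-- ===== SOURCE A (Python) =====
-- from typing import Optional, Dict, Any, Tuple
--
-- def _split_ffprobe_video_and_audio_streams(
--     streams: list,
-- ) -> Tuple[dict, dict, int, int]:
--     # split the streams and namesspace values by stream number
--     # only take one audio and one video stream
--     # return: Tuple[video, audio, num_video_streams, num_audio_streams]
--     aud = {}
--     vid = {}
--     num_audio_streams = 0
--     num_video_streams = 0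
--     for stream in streams:
--         if stream.get("codec_type") == "video":
--             num_video_streams += 1
--             if num_video_streams == 1:
--                 vid.update(stream)
--             else:
--                 vid.update({f"{k}_{num_video_streams}": v for k, v in stream.items()})
--         elif stream.get("codec_type") == "audio":
--             num_audio_streams += 1
--             if num_audio_streams == 1:
--                 aud.update(stream)
--             else:
--                 aud.update({f"{k}_{num_audio_streams}": v for k, v in stream.items()})
--     return vid, aud, num_video_streams, num_audio_streams
-- ===== SOURCE B (Python) =====
-- def _split_ffprobe_video_and_audio_streams(streams):
--     # Partition first, then merge each group independently (enumerate from 1).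
--     videos = [s for s in streams if s.get("codec_type") == "video"]
--     audios = [s for s in streams if s.get("codec_type") == "audio"]
--
--     def _merge(group):
--         out = {}
--         for i, stream in enumerate(group, 1):
--             if i == 1:
--                 out.update(stream)
--             else:
--                 out.update({f"{k}_{i}": v for k, v in stream.items()})
--         return out
--
--     return _merge(videos), _merge(audios), len(videos), len(audios)
-- ===== Notes on version B (the rewrite author's own statement) =====
-- stated objective: simpler
-- what changed: Replaces the single interleaved loop with four counters/dicts by a partition into video/audio lists followed by one uniform merge pass per group; counts become list lengths.
import Mathlib
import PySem

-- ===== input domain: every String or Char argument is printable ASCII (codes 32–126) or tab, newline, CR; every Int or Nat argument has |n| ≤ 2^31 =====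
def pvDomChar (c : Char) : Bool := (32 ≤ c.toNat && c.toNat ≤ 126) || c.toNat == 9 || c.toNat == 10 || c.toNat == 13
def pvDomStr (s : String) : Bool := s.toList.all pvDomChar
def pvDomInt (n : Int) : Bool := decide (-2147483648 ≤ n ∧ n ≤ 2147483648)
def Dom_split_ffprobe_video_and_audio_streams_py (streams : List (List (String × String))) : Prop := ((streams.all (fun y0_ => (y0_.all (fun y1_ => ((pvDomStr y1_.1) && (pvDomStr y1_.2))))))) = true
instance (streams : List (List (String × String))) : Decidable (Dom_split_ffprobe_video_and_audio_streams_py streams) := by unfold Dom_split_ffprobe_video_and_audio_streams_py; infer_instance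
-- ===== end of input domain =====

-- B partitions the streams into video/audio lists first and then merges each group
-- with one uniform enumerate-from-1 pass; counts are the lengths of the two lists.

-- ===== PORT A =====
-- f"{k}_{n}" suffixing of every key of a stream (dict comprehension of A; keys of a
-- Python dict are distinct, so the comprehension is exactly this map)
def pvSuffix (n : Int) (stream : List (String × String)) : List (String × String) :=
  stream.map (fun p => (p.1 ++ "_" ++ PySem.Int.toStr n, p.2))

-- one iteration of A's loop; state = (aud, vid, num_audio_streams, num_video_streams)
def pvStepA (st : PySem.Dict String String × PySem.Dict String String × Int × Int)
    (stream : List (String × String)) :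
    PySem.Dict String String × PySem.Dict String String × Int × Int :=
  let (aud, vid, na, nv) := st
  if (PySem.Dict.mk stream).get? "codec_type" == some "video" then
    if nv + 1 == 1 then (aud, vid.update stream, na, nv + 1)
    else (aud, vid.update (pvSuffix (nv + 1) stream), na, nv + 1)
  else if (PySem.Dict.mk stream).get? "codec_type" == some "audio" then
    if na + 1 == 1 then (aud.update stream, vid, na + 1, nv)
    else (aud.update (pvSuffix (na + 1) stream), vid, na + 1, nv)
  else (aud, vid, na, nv)

def split_ffprobe_video_and_audio_streams_py (streams : List (List (String × String))) : (List (String × String)) × (List (String × String)) × Int × Int :=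
  let r := streams.foldl pvStepA (PySem.Dict.empty, PySem.Dict.empty, 0, 0)
  (r.2.1.items, r.1.items, r.2.2.2, r.2.2.1)

-- ===== PORT B =====
-- one iteration of B's merge loop; state = (out, i) with i the 1-based enumerate index
def pvStepB (st : PySem.Dict String String × Int) (stream : List (String × String)) :
    PySem.Dict String String × Int :=
  if st.2 == 1 then (st.1.update stream, st.2 + 1)
  else (st.1.update (pvSuffix st.2 stream), st.2 + 1)

def pvMerge (group : List (List (String × String))) : PySem.Dict String String :=
  (group.foldl pvStepB (PySem.Dict.empty, 1)).1

def split_ffprobe_video_and_audio_streams_py_alt (streams : List (List (String × String))) : (List (String × String)) × (List (String × String)) × Int × Int :=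
  let videos := streams.filter (fun s => (PySem.Dict.mk s).get? "codec_type" == some "video")
  let audios := streams.filter (fun s => (PySem.Dict.mk s).get? "codec_type" == some "audio")
  ((pvMerge videos).items, (pvMerge audios).items, (videos.length : Int), (audios.length : Int))

-- ===== PRECONDITION & SPEC =====
-- Pre_ excludes association lists in which some stream has a duplicate key: such a
-- list does not represent any Python dict, so neither behaviour there is Python's.
def Pre_split_ffprobe_video_and_audio_streams_py (streams : List (List (String × String))) : Prop :=
  ∀ s ∈ streams, (s.map Prod.fst).Nodup
instance (streams : List (List (String × String))) : Decidable (Pre_split_ffprobe_video_and_audio_streams_py streams) := by unfold Pre_split_ffprobe_video_and_audio_streams_py; infer_instance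

def pvWitness_split_ffprobe_video_and_audio_streams_py : (List (List (String × String))) :=
  [[("codec_type", "video"), ("width", "640")], [("codec_type", "audio")], [("codec_type", "video"), ("width", "320")]]

def Spec_split_ffprobe_video_and_audio_streams_py (streams : List (List (String × String))) (out : (List (String × String)) × (List (String × String)) × Int × Int) : Prop := out = split_ffprobe_video_and_audio_streams_py_alt streams
instance (streams : List (List (String × String))) (out : (List (String × String)) × (List (String × String)) × Int × Int) : Decidable (Spec_split_ffprobe_video_and_audio_streams_py streams out) := by unfold Spec_split_ffprobe_video_and_audio_streams_py; infer_instance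

-- ===== CLAIM (what is proved, stated in full; the proofs are below) =====
def Claim_equal_split_ffprobe_video_and_audio_streams_py : Prop := ∀ (streams : List (List (String × String))), Dom_split_ffprobe_video_and_audio_streams_py streams → Pre_split_ffprobe_video_and_audio_streams_py streams → Spec_split_ffprobe_video_and_audio_streams_py streams (split_ffprobe_video_and_audio_streams_py streams)

-- ===== LEMMAS AND PROOFS =====

-- A's interleaved fold equals the pair of independent folds over the two filtered groups.
lemma pv_loop_split (streams : List (List (String × String)))
    (aud vid : PySem.Dict String String) (na nv : Int) :
    streams.foldl pvStepA (aud, vid, na, nv) =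
      ( ((streams.filter (fun s => (PySem.Dict.mk s).get? "codec_type" == some "audio")).foldl pvStepB (aud, na + 1)).1,
        ((streams.filter (fun s => (PySem.Dict.mk s).get? "codec_type" == some "video")).foldl pvStepB (vid, nv + 1)).1,
        na + ((streams.filter (fun s => (PySem.Dict.mk s).get? "codec_type" == some "audio")).length : Int),
        nv + ((streams.filter (fun s => (PySem.Dict.mk s).get? "codec_type" == some "video")).length : Int) ) := by
  induction streams generalizing aud vid na nv with
  | nil => simp
  | cons s rest ih =>
    by_cases hv : ((PySem.Dict.mk s).get? "codec_type" == some "video") = true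
    · have ha : ((PySem.Dict.mk s).get? "codec_type" == some "audio") = false := by
        revert hv; cases (PySem.Dict.mk s).get? "codec_type" <;> simp_all
      by_cases h1 : (nv + 1 == 1) = true
      · simp only [List.foldl_cons, List.filter_cons, hv, ha, pvStepA, pvStepB, h1,
          if_true, if_false, Bool.false_eq_true]
        rw [ih]
        simp only [List.length_cons]
        push_cast; ring_nf
      · simp only [List.foldl_cons, List.filter_cons, hv, ha, pvStepA, pvStepB, h1,
          if_true, if_false, Bool.false_eq_true]
        rw [ih]
        simp only [List.length_cons]
        push_cast; ring_nf
    · by_cases ha : ((PySem.Dict.mk s).get? "codec_type" == some "audio") = true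
      · by_cases h1 : (na + 1 == 1) = true
        · simp only [List.foldl_cons, List.filter_cons, hv, ha, pvStepA, pvStepB, h1,
            if_true, if_false, Bool.false_eq_true]
          rw [ih]
          simp only [List.length_cons]
          push_cast; ring_nf
        · simp only [List.foldl_cons, List.filter_cons, hv, ha, pvStepA, pvStepB, h1,
            if_true, if_false, Bool.false_eq_true]
          rw [ih]
          simp only [List.length_cons]
          push_cast; ring_nf
      · simp only [List.foldl_cons, List.filter_cons, hv, ha, pvStepA,
          Bool.false_eq_true, ite_false]
        exact ih aud vid na nv

-- ===== VERDICT (by name: the statement is the Claim_ definition above) =====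
theorem split_ffprobe_video_and_audio_streams_py_spec : Claim_equal_split_ffprobe_video_and_audio_streams_py := by
  intro streams _ _
  unfold Spec_split_ffprobe_video_and_audio_streams_py
  unfold split_ffprobe_video_and_audio_streams_py split_ffprobe_video_and_audio_streams_py_alt pvMerge
  rw [pv_loop_split]
  simp
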